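-- pv_equiv track=rewrite | github.com/22nicolet/2020_ast07 | pythonscripts/CCD.py | combine_radial_bins
-- ===== SOURCE A (Python) =====
-- def combine_radial_bins(raw_num_gcs_in_annuli):
--     new_radial_bins = []
--     #Find the index of the rightmost bin with GC
--     index_of_last_nonzero_bin = -1
--     for i in reversed(range(len(raw_num_gcs_in_annuli))):
--         if raw_num_gcs_in_annuli[i] != 0:
--             index_of_last_nonzero_bin = i
--             break
--
--     if index_of_last_nonzero_bin == -1:
--         # If there is no GC in any of the bins, return without combining
--         for i in range(len(raw_num_gcs_in_annuli)):
--             new_radial_bins.append([i, i])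
--     else:
--         index = 0
--         while index <= index_of_last_nonzero_bin:
--             #Any bins with zero GC will be combined with the
--             #first bin with GC to its right (bigger index).
--             start_index = index
--             while raw_num_gcs_in_annuli[index] == 0 and index <= index_of_last_nonzero_bin:
--                 index += 1
--             end_index = index
--             new_radial_bins.append([start_index, end_index])
--             index += 1
--         #If index_of_last_nonzero_bin is not the last bin, then any bin with
--         #index bigger than it contains 0 GCs.  Add them to the last new_radial_bins
--         if index_of_last_nonzero_bin < (len(raw_num_gcs_in_annuli) - 1):
--             new_radial_bins[-1][-1] = len(raw_num_gcs_in_annuli) - 1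
--     return new_radial_bins
-- ===== SOURCE B (Python) =====
-- def combine_radial_bins(raw_num_gcs_in_annuli):
--     n = len(raw_num_gcs_in_annuli)
--     nonzero = [i for i, v in enumerate(raw_num_gcs_in_annuli) if v != 0]
--     if not nonzero:
--         return [[i, i] for i in range(n)]
--     bins = []
--     prev = -1
--     for cur in nonzero:
--         bins.append([prev + 1, cur])
--         prev = cur
--     if prev < n - 1:
--         bins[-1][-1] = n - 1
--     return bins
-- ===== Notes on version B (the rewrite author's own statement) =====
-- stated objective: alternative
-- what changed: B replaces A's reversed scan for the last nonzero bin and the nested pointer-advancing while loops by a one-pass nonzero-index table followed by a single pairwise pass (interval [prev+1, cur] per nonzero index), patching the last interval for trailing zeros.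
import Mathlib
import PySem

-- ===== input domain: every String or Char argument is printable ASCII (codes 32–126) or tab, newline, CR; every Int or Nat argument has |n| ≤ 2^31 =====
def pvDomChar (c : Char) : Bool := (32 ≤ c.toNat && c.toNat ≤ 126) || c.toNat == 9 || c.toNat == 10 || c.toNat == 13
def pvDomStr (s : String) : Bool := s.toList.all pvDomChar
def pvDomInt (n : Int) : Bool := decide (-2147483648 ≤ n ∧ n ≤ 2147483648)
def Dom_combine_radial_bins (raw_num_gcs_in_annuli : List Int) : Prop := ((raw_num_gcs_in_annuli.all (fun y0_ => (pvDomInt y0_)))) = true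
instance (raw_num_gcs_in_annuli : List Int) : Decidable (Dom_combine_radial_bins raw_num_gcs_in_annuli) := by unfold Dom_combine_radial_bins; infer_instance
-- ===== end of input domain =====

-- B groups zero bins with the next nonzero bin by first tabulating the nonzero indices and
-- emitting one interval per nonzero index, instead of A's nested pointer-advancing while loops.

-- ===== PORT A =====
-- `for i in reversed(range(len(raw))): if raw[i] != 0: ... break` — first hit of the reversed index list.
-- raw[i] is ported as pyGetD with default 0: every index the Python code reaches is in range.
def pvA_lastNZ (raw : List Int) : List Nat → Int
  | [] => -1
  | i :: rest => if PySem.List.pyGetD raw (i : Int) 0 ≠ 0 then (i : Int) else pvA_lastNZ raw rest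

-- inner `while raw[index] == 0 and index <= index_of_last_nonzero_bin: index += 1`
def pvA_skipZeros (raw : List Int) (last : Int) (index : Int) : Int :=
  if h : PySem.List.pyGetD raw index 0 = 0 ∧ index ≤ last then
    pvA_skipZeros raw last (index + 1)
  else index
termination_by (last + 1 - index).toNat
decreasing_by omega

-- the port's termination measure needs this fact, so it stays above the port that cites it
theorem pvA_skipZeros_ge (raw : List Int) (last index : Int) : index ≤ pvA_skipZeros raw last index := by
  unfold pvA_skipZeros
  split
  · have := pvA_skipZeros_ge raw last (index + 1); omega
  · omega
termination_by (last + 1 - index).toNat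
decreasing_by rename_i h; omega

-- `new_radial_bins[-1][-1] = v`
def pySetLastLast (bins : List (List Int)) (v : Int) : List (List Int) :=
  bins.dropLast ++ [(bins.getLastD []).dropLast ++ [v]]

-- outer `while index <= index_of_last_nonzero_bin: ...`
def pvA_combineLoop (raw : List Int) (last : Int) (index : Int) (acc : List (List Int)) : List (List Int) :=
  if _h : index ≤ last then
    let e := pvA_skipZeros raw last index
    pvA_combineLoop raw last (e + 1) (acc ++ [[index, e]])
  else acc
termination_by (last + 1 - index).toNat
decreasing_by
  have := pvA_skipZeros_ge raw last index
  omega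

def combine_radial_bins (raw_num_gcs_in_annuli : List Int) : List (List Int) :=
  let last := pvA_lastNZ raw_num_gcs_in_annuli (List.range raw_num_gcs_in_annuli.length).reverse
  if last = -1 then
    (PySem.List.pyRange 0 (raw_num_gcs_in_annuli.length : Int) 1).map (fun i => [i, i])
  else
    let bins := pvA_combineLoop raw_num_gcs_in_annuli last 0 []
    if last < (raw_num_gcs_in_annuli.length : Int) - 1 then
      pySetLastLast bins ((raw_num_gcs_in_annuli.length : Int) - 1)
    else bins

-- ===== PORT B =====
-- `for cur in nonzero: bins.append([prev + 1, cur]); prev = cur` — returns (bins, final prev)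
def pvB_pairs (prev : Int) : List Int → List (List Int) × Int
  | [] => ([], prev)
  | c :: rest =>
    let r := pvB_pairs c rest
    ([prev + 1, c] :: r.1, r.2)

def combine_radial_bins_alt (raw_num_gcs_in_annuli : List Int) : List (List Int) :=
  let n : Int := raw_num_gcs_in_annuli.length
  let nonzero := ((PySem.List.enumerate raw_num_gcs_in_annuli 0).filter (fun p => p.2 != 0)).map (fun p => p.1)
  if nonzero.isEmpty then
    (PySem.List.pyRange 0 n 1).map (fun i => [i, i])
  else
    let r := pvB_pairs (-1) nonzero
    if r.2 < n - 1 then pySetLastLast r.1 (n - 1) else r.1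

-- ===== PRECONDITION & SPEC =====
def Spec_combine_radial_bins (raw_num_gcs_in_annuli : List Int) (out : List (List Int)) : Prop := out = combine_radial_bins_alt raw_num_gcs_in_annuli
instance (raw_num_gcs_in_annuli : List Int) (out : List (List Int)) : Decidable (Spec_combine_radial_bins raw_num_gcs_in_annuli out) := by unfold Spec_combine_radial_bins; infer_instance

-- ===== CLAIM (what is proved, stated in full; the proofs are below) =====
def Claim_equal_combine_radial_bins : Prop := ∀ (raw_num_gcs_in_annuli : List Int), Dom_combine_radial_bins raw_num_gcs_in_annuli → Spec_combine_radial_bins raw_num_gcs_in_annuli (combine_radial_bins raw_num_gcs_in_annuli)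

-- ===== LEMMAS AND PROOFS =====

-- the nonzero indices of raw, as naturals
def pvNZ (raw : List Int) : List Nat := (List.range raw.length).filter (fun i => raw.getD i 0 != 0)

theorem pvNZ_mem (raw : List Int) (i : Nat) :
    i ∈ pvNZ raw ↔ i < raw.length ∧ raw.getD i 0 ≠ 0 := by
  simp [pvNZ, List.mem_filter, List.mem_range]

theorem pvNZ_pairwise (raw : List Int) : (pvNZ raw).Pairwise (· < ·) :=
  (List.pairwise_lt_range).filter _

-- B's nonzero list is pvNZ, cast to Int
theorem pvB_nonzero_eq (raw : List Int) :
    ((PySem.List.enumerate raw 0).filter (fun p => p.2 != 0)).map (fun p => p.1)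
      = (pvNZ raw).map (fun i : Nat => (i : Int)) := by
  rw [PySem.List.enumerate_eq_map_pyRange (d := 0), PySem.List.len_eq, PySem.List.pyRange_zero_nat]
  simp [pvNZ, List.filter_map, List.map_map, Function.comp_def, List.getD]

-- A's reversed scan computes the last element of pvNZ (-1 if none)
theorem pvA_lastNZ_eq (raw : List Int) (m : Nat) :
    pvA_lastNZ raw (List.range m).reverse
      = ((((List.range m).filter (fun i => raw.getD i 0 != 0)).getLast?).map (fun i : Nat => (i : Int))).getD (-1) := by
  induction m with
  | zero => simp [pvA_lastNZ]
  | succ m ih =>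
    rw [List.range_succ, List.reverse_append, List.filter_append]
    simp only [List.reverse_singleton, List.singleton_append, pvA_lastNZ]
    by_cases h : raw.getD m 0 = 0
    · simp only [List.getD] at h
      simp [h, ih, List.getD]
    · simp only [List.getD] at h
      simp [h]

-- the inner while lands exactly on the first nonzero index ≥ i
theorem pvA_skipZeros_eq (raw : List Int) (last : Int) (c i : Nat)
    (hcv : raw.getD c 0 ≠ 0) (hcl : (c : Int) ≤ last) (hic : i ≤ c)
    (hz : ∀ j, i ≤ j → j < c → raw.getD j 0 = 0) :
    pvA_skipZeros raw last (i : Int) = (c : Int) := by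
  unfold pvA_skipZeros
  rcases Nat.eq_or_lt_of_le hic with h | h
  · subst h
    rw [dif_neg]
    rintro ⟨h0, -⟩
    exact hcv (by simpa using h0)
  · rw [dif_pos ⟨by simpa using hz i le_rfl h, by omega⟩]
    have hcast : ((i : Int) + 1) = ((i + 1 : Nat) : Int) := by push_cast; ring
    rw [hcast]
    exact pvA_skipZeros_eq raw last c (i + 1) hcv hcl h (fun j hj1 hj2 => hz j (by omega) hj2)
termination_by c - i

-- getLast of a strictly increasing list bounds every member
theorem pv_le_getLast {l : List Nat} (hp : l.Pairwise (· < ·)) {a : Nat} (ha : a ∈ l) (h : l ≠ []) :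
    a ≤ l.getLast h := by
  induction l with
  | nil => cases ha
  | cons x t ih =>
    cases t with
    | nil => simp_all
    | cons y u =>
      rw [List.getLast_cons (by simp)]
      rcases List.mem_cons.mp ha with rfl | ha'
      · exact le_of_lt ((List.pairwise_cons.mp hp).1 _ (List.getLast_mem _))
      · exact ih (List.pairwise_cons.mp hp).2 ha' (by simp)

-- B's final prev is the last nonzero index
theorem pvB_pairs_snd (prev : Int) (l : List Int) (h : l ≠ []) :
    (pvB_pairs prev l).2 = l.getLast h := by
  induction l generalizing prev with
  | nil => exact absurd rfl h
  | cons c rest ih =>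
    cases rest with
    | nil => simp [pvB_pairs]
    | cons d u =>
      rw [List.getLast_cons (by simp)]
      simpa [pvB_pairs] using ih c (by simp)

-- the outer while over the suffix s of nonzero indices at/above i produces B's pairwise intervals
theorem pvA_combineLoop_eq (raw : List Int) (L : Nat)
    (hLn : L < raw.length) (hLv : raw.getD L 0 ≠ 0)
    (s : List Nat) (i : Nat) (acc : List (List Int))
    (h1 : ∀ j ∈ s, i ≤ j ∧ j ≤ L ∧ raw.getD j 0 ≠ 0)
    (h2 : ∀ j, i ≤ j → j < raw.length → raw.getD j 0 ≠ 0 → j ∈ s)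
    (hp : s.Pairwise (· < ·)) :
    pvA_combineLoop raw (L : Int) (i : Int) acc
      = acc ++ (pvB_pairs ((i : Int) - 1) (s.map (fun j : Nat => (j : Int)))).1 := by
  induction s generalizing i acc with
  | nil =>
    have hLi : L < i := by
      by_contra hcon
      exact absurd (h2 L (by omega) hLn hLv) (List.not_mem_nil)
    unfold pvA_combineLoop
    rw [dif_neg (by omega)]
    simp [pvB_pairs]
  | cons c rest ih =>
    obtain ⟨hic, hcL, hcv⟩ := h1 c (List.mem_cons_self ..)
    have hskip : pvA_skipZeros raw (L : Int) (i : Int) = (c : Int) := by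
      apply pvA_skipZeros_eq raw (L : Int) c i hcv (by exact_mod_cast hcL) hic
      intro j hj1 hj2
      by_contra hnz
      have hjmem := h2 j hj1 (by omega) hnz
      rcases List.mem_cons.mp hjmem with rfl | hmem
      · omega
      · have := (List.pairwise_cons.mp hp).1 j hmem; omega
    unfold pvA_combineLoop
    rw [dif_pos (by omega : (i : Int) ≤ (L : Int))]
    show pvA_combineLoop raw (L : Int) (pvA_skipZeros raw (L : Int) (i : Int) + 1)
        (acc ++ [[(i : Int), pvA_skipZeros raw (L : Int) (i : Int)]]) = _
    rw [hskip]
    have hcast : ((c : Int) + 1) = ((c + 1 : Nat) : Int) := by push_cast; ring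
    rw [hcast, ih (c + 1) (acc ++ [[(i : Int), (c : Int)]])
      (fun j hj => ⟨by have := (List.pairwise_cons.mp hp).1 j hj; omega,
                    ((h1 j (List.mem_cons_of_mem _ hj)).2.1),
                    ((h1 j (List.mem_cons_of_mem _ hj)).2.2)⟩)
      (fun j hj1 hj2 hj3 => by
        rcases List.mem_cons.mp (h2 j (by omega) hj2 hj3) with rfl | hmem
        · omega
        · exact hmem)
      (List.pairwise_cons.mp hp).2]
    simp [pvB_pairs]

-- ===== VERDICT (by name: the statement is the Claim_ definition above) =====
theorem combine_radial_bins_spec : Claim_equal_combine_radial_bins := by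
  intro raw _
  unfold Spec_combine_radial_bins combine_radial_bins combine_radial_bins_alt
  rw [pvB_nonzero_eq, pvA_lastNZ_eq]
  by_cases hnz : pvNZ raw = []
  · have hnzf : (List.range raw.length).filter (fun i => raw.getD i 0 != 0) = [] := by
      simpa [pvNZ] using hnz
    rw [hnzf, hnz]
    simp
  · have hL := List.getLast_mem hnz
    obtain ⟨hLn, hLv⟩ := (pvNZ_mem raw _).mp hL
    have hgl : ((List.range raw.length).filter (fun i => raw.getD i 0 != 0)).getLast?
        = some ((pvNZ raw).getLast hnz) := by
      exact List.getLast?_eq_some_getLast hnz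
    rw [hgl]
    simp only [Option.map_some, Option.getD_some]
    rw [if_neg (by omega : ¬(((pvNZ raw).getLast hnz : Int) = -1))]
    have hmapne : (pvNZ raw).map (fun j : Nat => (j : Int)) ≠ [] := by
      simpa using hnz
    rw [if_neg (by simpa using hnz : ¬(((pvNZ raw).map (fun j : Nat => (j : Int))).isEmpty = true))]
    have hloop : pvA_combineLoop raw (((pvNZ raw).getLast hnz : Nat) : Int) 0 []
        = (pvB_pairs (-1) ((pvNZ raw).map (fun j : Nat => (j : Int)))).1 := by
      have h := pvA_combineLoop_eq raw ((pvNZ raw).getLast hnz) hLn hLv (pvNZ raw) 0 []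
        (fun j hj => ⟨Nat.zero_le j, pv_le_getLast (pvNZ_pairwise raw) hj hnz,
          ((pvNZ_mem raw j).mp hj).2⟩)
        (fun j _ hj2 hj3 => (pvNZ_mem raw j).mpr ⟨hj2, hj3⟩)
        (pvNZ_pairwise raw)
      simpa using h
    have hsnd : (pvB_pairs (-1) ((pvNZ raw).map (fun j : Nat => (j : Int)))).2
        = (((pvNZ raw).getLast hnz : Nat) : Int) := by
      rw [pvB_pairs_snd _ _ hmapne, List.getLast_map]
    rw [hloop, hsnd]
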